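-- pv_equiv track=rewrite | github.com/BPI-SINOVOIP/BPI-S905X3-Android9 | external/autotest/client/common_lib/cros/manual/get_usb_devices.py | get_cameras
-- ===== SOURCE A (Python) =====
-- CAMERA_LIST = ['2bd9:0011', '046d:0843', '046d:082d', '046d:0853', '064e:9405',
--                '046d:085f']
--
-- def get_cameras(usbdata):
--     """get number of camera for each type
--     @param usbdata:  list of dictionary for usb devices
--     @returns: list of dictionary, key is VID_PID, value is number of cameras
--     """
--     number_camera = {}
--     for _camera in CAMERA_LIST:
--         vid =  _camera.split(':')[0]
--         pid =  _camera.split(':')[1]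
--         _number = 0
--         for _data in usbdata:
--             if _data['Vendor'] == vid and  _data['ProdID'] == pid:
--                 _number += 1
--         number_camera[_camera] = _number
--     return number_camera
-- ===== SOURCE B (Python) =====
-- CAMERA_LIST = ['2bd9:0011', '046d:0843', '046d:082d', '046d:0853', '064e:9405',
--                '046d:085f']
--
-- def get_cameras(usbdata):
--     """One pass over usbdata building a counter keyed by (vendor, prodid),
--     then one O(1) lookup per known camera."""
--     vids = {camera.split(':')[0] for camera in CAMERA_LIST}
--     counts = {}
--     for data in usbdata:
--         vendor = data['Vendor']
--         if vendor in vids: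
--             key = (vendor, data['ProdID'])
--             counts[key] = counts.get(key, 0) + 1
--     return {camera: counts.get((camera.split(':')[0], camera.split(':')[1]), 0)
--             for camera in CAMERA_LIST}
-- ===== Notes on version B (the rewrite author's own statement) =====
-- stated objective: faster
-- what changed: Replaces A's nested per-camera rescan of usbdata (6 passes, re-splitting each camera string twice per pass) with one counting pass over usbdata building a dict keyed by (vendor, prodid) for devices whose vendor is a known camera vendor, followed by one O(1) lookup per camera.
import Mathlib
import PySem

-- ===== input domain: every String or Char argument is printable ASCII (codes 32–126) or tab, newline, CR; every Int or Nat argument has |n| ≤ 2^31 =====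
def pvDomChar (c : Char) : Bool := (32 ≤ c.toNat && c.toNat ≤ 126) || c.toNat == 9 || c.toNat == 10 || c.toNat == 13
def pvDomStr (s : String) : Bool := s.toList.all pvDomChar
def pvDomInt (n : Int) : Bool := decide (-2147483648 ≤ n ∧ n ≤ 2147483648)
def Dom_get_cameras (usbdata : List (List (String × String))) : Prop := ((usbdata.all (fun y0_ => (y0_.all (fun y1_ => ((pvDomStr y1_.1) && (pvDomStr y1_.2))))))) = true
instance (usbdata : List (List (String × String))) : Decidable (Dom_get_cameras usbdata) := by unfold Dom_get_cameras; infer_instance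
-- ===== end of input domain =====

-- B replaces A's per-camera rescan of usbdata by one counting pass keyed by (vendor, prodid)
-- followed by one lookup per camera; same return value wherever A returns.

def pvCameraList : List String := ["2bd9:0011", "046d:0843", "046d:082d", "046d:0853",
                                   "064e:9405", "046d:085f"]

-- ===== PORT A =====
def get_cameras (usbdata : List (List (String × String))) : List (String × Int) :=
  (pvCameraList.foldl (fun number_camera _camera =>
      let vid := PySem.List.pyGetD ((PySem.Str.split? _camera ":").getD []) 0 ""
      let pid := PySem.List.pyGetD ((PySem.Str.split? _camera ":").getD []) 1 ""
      let _number := usbdata.foldl (fun _number _data =>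
          if _data.lookup "Vendor" = some vid ∧ _data.lookup "ProdID" = some pid
          then _number + 1 else _number) (0 : Int)
      number_camera.insert _camera _number)
    (PySem.Dict.empty : PySem.Dict String Int)).items

-- ===== PORT B =====
def get_cameras_alt (usbdata : List (List (String × String))) : List (String × Int) :=
  let vids : PySem.Set String :=
    PySem.Set.ofList (pvCameraList.map (fun camera => PySem.List.pyGetD ((PySem.Str.split? camera ":").getD []) 0 ""))
  let counts : PySem.Dict (String × String) Int :=
    usbdata.foldl (fun counts data =>
      match data.lookup "Vendor" with
      | none => counts            -- Python raises KeyError here; excluded by Pre_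
      | some vendor =>
        if PySem.Set.contains vids vendor then
          match data.lookup "ProdID" with
          | none => counts        -- Python raises KeyError here; excluded by Pre_
          | some pid => counts.insert (vendor, pid) (counts.getD (vendor, pid) 0 + 1)
        else counts) PySem.Dict.empty
  (pvCameraList.foldl (fun res camera =>
      res.insert camera (counts.getD
        (PySem.List.pyGetD ((PySem.Str.split? camera ":").getD []) 0 "",
         PySem.List.pyGetD ((PySem.Str.split? camera ":").getD []) 1 "") 0))
    (PySem.Dict.empty : PySem.Dict String Int)).items

-- ===== PRECONDITION & SPEC =====
-- Pre_ excludes exactly the inputs on which the Python A raises KeyError: a device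
-- without a 'Vendor' key, or whose vendor is one of the known camera vendor ids
-- but which lacks a 'ProdID' key. (B raises the same KeyError there.)
def Pre_get_cameras (usbdata : List (List (String × String))) : Prop :=
  ∀ d ∈ usbdata, (d.lookup "Vendor").isSome = true ∧
    ((d.lookup "Vendor").getD "" ∈ (["2bd9", "046d", "064e"] : List String) →
      (d.lookup "ProdID").isSome = true)
instance (usbdata : List (List (String × String))) : Decidable (Pre_get_cameras usbdata) := by unfold Pre_get_cameras; infer_instance

def pvWitness_get_cameras : (List (List (String × String))) :=
  [[("Vendor", "046d"), ("ProdID", "0843")], [("Vendor", "aaaa")]]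

def Spec_get_cameras (usbdata : List (List (String × String))) (out : List (String × Int)) : Prop := out = get_cameras_alt usbdata
instance (usbdata : List (List (String × String))) (out : List (String × Int)) : Decidable (Spec_get_cameras usbdata out) := by unfold Spec_get_cameras; infer_instance

-- ===== CLAIM (what is proved, stated in full; the proofs are below) =====
def Claim_equal_get_cameras : Prop := ∀ (usbdata : List (List (String × String))), Dom_get_cameras usbdata → Pre_get_cameras usbdata → Spec_get_cameras usbdata (get_cameras usbdata)

-- ===== LEMMAS AND PROOFS =====

-- B's counting fold, looked up at a camera's (vid, pid) key, equals A's inner counting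
-- loop for that camera, provided the camera's vendor id is in B's vendor set.
lemma counts_getD_eq (vid pid : String)
    (hvid : vid ∈ (["2bd9", "046d", "064e"] : List String)) :
    ∀ (usbdata : List (List (String × String))) (d : PySem.Dict (String × String) Int),
    (usbdata.foldl (fun counts data =>
      match data.lookup "Vendor" with
      | none => counts
      | some vendor =>
        if PySem.Set.contains (["2bd9", "046d", "064e"] : PySem.Set String) vendor then
          match data.lookup "ProdID" with
          | none => counts
          | some pid' => counts.insert (vendor, pid') (counts.getD (vendor, pid') 0 + 1)
        else counts) d).getD (vid, pid) 0
    = d.getD (vid, pid) 0 + usbdata.foldl (fun _number _data =>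
          if _data.lookup "Vendor" = some vid ∧ _data.lookup "ProdID" = some pid
          then _number + 1 else _number) (0 : Int) := by
  intro usbdata
  induction usbdata with
  | nil => intro d; simp
  | cons dev rest ih =>
    intro d
    have hshift : ∀ (n : Int),
        rest.foldl (fun _number _data =>
          if _data.lookup "Vendor" = some vid ∧ _data.lookup "ProdID" = some pid
          then _number + 1 else _number) n
        = n + rest.foldl (fun _number _data =>
          if _data.lookup "Vendor" = some vid ∧ _data.lookup "ProdID" = some pid
          then _number + 1 else _number) 0 := by
      intro n
      have hc : ∀ (m : Int) (_data : List (String × String)),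
          (if _data.lookup "Vendor" = some vid ∧ _data.lookup "ProdID" = some pid
           then m + 1 else m)
          = m + (if _data.lookup "Vendor" = some vid ∧ _data.lookup "ProdID" = some pid
                 then (1 : Int) else 0) := by
        intro m _data; split_ifs <;> omega
      calc rest.foldl (fun _number _data =>
              if _data.lookup "Vendor" = some vid ∧ _data.lookup "ProdID" = some pid
              then _number + 1 else _number) n
          = rest.foldl (fun _number _data => _number +
              (if _data.lookup "Vendor" = some vid ∧ _data.lookup "ProdID" = some pid
               then (1 : Int) else 0)) n := by
            exact PySem.List.foldl_congr_mem _ _ _ _ (fun a x _ => hc a x)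
        _ = n + ((rest.map (fun _data =>
              if _data.lookup "Vendor" = some vid ∧ _data.lookup "ProdID" = some pid
              then (1 : Int) else 0)).sum) := PySem.List.foldl_add ..
        _ = n + rest.foldl (fun _number _data => _number +
              (if _data.lookup "Vendor" = some vid ∧ _data.lookup "ProdID" = some pid
               then (1 : Int) else 0)) 0 := by rw [PySem.List.foldl_add]; ring
        _ = _ := by
            congr 1
            exact (PySem.List.foldl_congr_mem _ _ _ _ (fun a x _ => hc a x)).symm
    have hstep : (match dev.lookup "Vendor" with
      | none => d
      | some vendor =>
        if PySem.Set.contains (["2bd9", "046d", "064e"] : PySem.Set String) vendor then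
          match dev.lookup "ProdID" with
          | none => d
          | some pid' => d.insert (vendor, pid') (d.getD (vendor, pid') 0 + 1)
        else d).getD (vid, pid) 0
      = d.getD (vid, pid) 0 +
        (if dev.lookup "Vendor" = some vid ∧ dev.lookup "ProdID" = some pid
         then (1 : Int) else 0) := by
      cases hV : dev.lookup "Vendor" with
      | none => simp
      | some v =>
        by_cases hmem : v ∈ (["2bd9", "046d", "064e"] : List String)
        · have hc : PySem.Set.contains (["2bd9", "046d", "064e"] : PySem.Set String) v = true := by
            rw [PySem.Set.contains_iff]; exact hmem
          cases hP : dev.lookup "ProdID" with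
          | none => simp
          | some p =>
            simp only [hc, if_true]
            rw [PySem.Dict.getD_insert]
            by_cases hk : ((vid, pid) : String × String) = (v, p)
            · have h1 : v = vid := (Prod.mk.injEq .. ▸ hk).1.symm
              have h2 : p = pid := (Prod.mk.injEq .. ▸ hk).2.symm
              simp [hk, h1, h2]
            · have hne : ¬ (v = vid ∧ p = pid) := by
                rintro ⟨rfl, rfl⟩; exact hk rfl
              simp [hk, hne]
        · have hor : ¬ (v = "2bd9" ∨ v = "046d" ∨ v = "064e") := by simpa using hmem
          have hne : ¬ (v = vid ∧ dev.lookup "ProdID" = some pid) := by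
            rintro ⟨rfl, -⟩; exact hmem hvid
          simp [hor, hne]
    simp only [List.foldl_cons]
    rw [ih, hstep]
    split_ifs with h
    · rw [hshift ((0 : Int) + 1)]; ring
    · ring

theorem get_cameras_spec : Claim_equal_get_cameras := by
  intro usbdata _ _
  show get_cameras usbdata = get_cameras_alt usbdata
  have hset : PySem.Set.ofList (pvCameraList.map
      (fun camera => PySem.List.pyGetD ((PySem.Str.split? camera ":").getD []) 0 ""))
      = (["2bd9", "046d", "064e"] : PySem.Set String) := by decide
  unfold get_cameras get_cameras_alt
  simp only [hset]
  simp only [pvCameraList, List.foldl_cons, List.foldl_nil,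
    show PySem.List.pyGetD ((PySem.Str.split? "2bd9:0011" ":").getD []) 0 "" = "2bd9" from by decide,
    show PySem.List.pyGetD ((PySem.Str.split? "2bd9:0011" ":").getD []) 1 "" = "0011" from by decide,
    show PySem.List.pyGetD ((PySem.Str.split? "046d:0843" ":").getD []) 0 "" = "046d" from by decide,
    show PySem.List.pyGetD ((PySem.Str.split? "046d:0843" ":").getD []) 1 "" = "0843" from by decide,
    show PySem.List.pyGetD ((PySem.Str.split? "046d:082d" ":").getD []) 0 "" = "046d" from by decide,
    show PySem.List.pyGetD ((PySem.Str.split? "046d:082d" ":").getD []) 1 "" = "082d" from by decide,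
    show PySem.List.pyGetD ((PySem.Str.split? "046d:0853" ":").getD []) 0 "" = "046d" from by decide,
    show PySem.List.pyGetD ((PySem.Str.split? "046d:0853" ":").getD []) 1 "" = "0853" from by decide,
    show PySem.List.pyGetD ((PySem.Str.split? "064e:9405" ":").getD []) 0 "" = "064e" from by decide,
    show PySem.List.pyGetD ((PySem.Str.split? "064e:9405" ":").getD []) 1 "" = "9405" from by decide,
    show PySem.List.pyGetD ((PySem.Str.split? "046d:085f" ":").getD []) 0 "" = "046d" from by decide,
    show PySem.List.pyGetD ((PySem.Str.split? "046d:085f" ":").getD []) 1 "" = "085f" from by decide]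
  rw [counts_getD_eq "2bd9" "0011" (by decide) usbdata,
      counts_getD_eq "046d" "0843" (by decide) usbdata,
      counts_getD_eq "046d" "082d" (by decide) usbdata,
      counts_getD_eq "046d" "0853" (by decide) usbdata,
      counts_getD_eq "064e" "9405" (by decide) usbdata,
      counts_getD_eq "046d" "085f" (by decide) usbdata]
  simp only [PySem.Dict.getD_empty, zero_add]
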